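-- pv_equiv track=rewrite | github.com/luislorenzom/b33th0v3n | src/refactor/utils.py | permute_chunks
-- ===== SOURCE A (Python) =====
-- def permute_chunks(chunks: list) -> list:
--     """
--     Permute all words inside a list to create all possible combinations
--
--     :param chunks: list with words to permute
--
--     :return: all permuted results
--     :raise Exception: when chunks is an empty list
--     """
--     if len(chunks) == 0:
--         raise Exception('chunks must not be empty')
--     if len(chunks) == 1:
--         return chunks
--     else:
--         l = [chunks.pop(0)]
--         for c in chunks:
--             l.append(l[-1] + ' ' + c)
--     return l + permute_chunks(chunks)
-- ===== SOURCE B (Python) =====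
-- def permute_chunks(chunks: list) -> list:
--     """Iterative re-implementation: same return value and same in-place
--     mutation of `chunks` (popped down to its last element) as the recursive original."""
--     if len(chunks) == 0:
--         raise Exception('chunks must not be empty')
--     result = []
--     while len(chunks) > 1:
--         cur = chunks.pop(0)
--         prefixes = [cur]
--         for c in chunks:
--             cur = cur + ' ' + c
--             prefixes.append(cur)
--         result += prefixes
--     return result + chunks
-- ===== Notes on version B (the rewrite author's own statement) =====
-- stated objective: alternative
-- what changed: Replaced A's tail recursion with an explicit iterative while-loop over a result accumulator, and the l[-1] lookup with a running `cur` prefix variable; same pop-front mutation and same output order.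
import Mathlib
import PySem

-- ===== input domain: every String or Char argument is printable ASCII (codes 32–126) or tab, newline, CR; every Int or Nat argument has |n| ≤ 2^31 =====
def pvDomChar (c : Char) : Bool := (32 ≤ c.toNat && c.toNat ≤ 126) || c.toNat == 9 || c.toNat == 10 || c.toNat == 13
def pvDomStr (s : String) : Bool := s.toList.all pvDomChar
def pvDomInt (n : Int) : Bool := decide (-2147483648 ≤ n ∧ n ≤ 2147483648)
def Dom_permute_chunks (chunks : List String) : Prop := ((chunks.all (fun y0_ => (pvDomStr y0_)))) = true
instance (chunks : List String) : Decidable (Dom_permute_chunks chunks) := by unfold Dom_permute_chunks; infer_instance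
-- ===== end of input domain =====

-- B replaces A's tail recursion by an explicit iterative loop with a result accumulator and a
-- running `cur` prefix (no l[-1] lookup); same return value and same in-place pop-to-last mutation.
-- Equivalence is about the RETURN value; both raise on the empty list (excluded by Pre_).

-- ===== PORT A =====
def permute_chunks : List String → List String
  | [] => []            -- unreachable under Pre_: Python raises here
  | [x] => [x]
  | x :: y :: rest =>
      -- l = [chunks.pop(0)]; for c in chunks: l.append(l[-1] + ' ' + c)
      ((y :: rest).foldl (fun l c => l ++ [l.getLast! ++ " " ++ c]) [x])
        ++ permute_chunks (y :: rest)

-- ===== PORT B =====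
-- prefixes = [cur]; for c in chunks: cur = cur + ' ' + c; prefixes.append(cur)
def pcPrefixes (first : String) (cs : List String) : List String :=
  (cs.foldl (fun (p : List String × String) c =>
      let cur' := p.2 ++ " " ++ c
      (p.1 ++ [cur'], cur')) ([first], first)).1

-- result = []; while len(chunks) > 1: first = chunks.pop(0); result += prefixes; return result + chunks
def pcLoop (result : List String) : List String → List String
  | x :: y :: rest => pcLoop (result ++ pcPrefixes x (y :: rest)) (y :: rest)
  | cs => result ++ cs

def permute_chunks_alt (chunks : List String) : List String :=
  pcLoop [] chunks      -- (Python B raises on []; excluded by Pre_)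

-- ===== PRECONDITION & SPEC =====
-- Pre_ excludes exactly the empty list, on which the Python A raises Exception.
def Pre_permute_chunks (chunks : List String) : Prop := chunks ≠ []
instance (chunks : List String) : Decidable (Pre_permute_chunks chunks) := by unfold Pre_permute_chunks; infer_instance
def pvWitness_permute_chunks : List String := (["ab", "cd"])

def Spec_permute_chunks (chunks : List String) (out : List String) : Prop := out = permute_chunks_alt chunks
instance (chunks : List String) (out : List String) : Decidable (Spec_permute_chunks chunks out) := by unfold Spec_permute_chunks; infer_instance

-- ===== CLAIM (what is proved, stated in full; the proofs are below) =====
def Claim_equal_permute_chunks : Prop := ∀ (chunks : List String), Dom_permute_chunks chunks → Pre_permute_chunks chunks → Spec_permute_chunks chunks (permute_chunks chunks)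

-- ===== LEMMAS AND PROOFS =====

lemma getLast!_concat' (l : List String) (a : String) : (l ++ [a]).getLast! = a := by
  have h : (l ++ [a]) ≠ [] := by simp
  rw [List.getLast!_eq_getLast?_getD, List.getLast?_concat]
  rfl

lemma pref_eq : ∀ (cs l : List String) (cur : String), l.getLast! = cur →
    cs.foldl (fun l c => l ++ [l.getLast! ++ " " ++ c]) l
      = (cs.foldl (fun (p : List String × String) c =>
          let cur' := p.2 ++ " " ++ c
          (p.1 ++ [cur'], cur')) (l, cur)).1 := by
  intro cs
  induction cs with
  | nil => intro l cur _; rfl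
  | cons c cs ih =>
      intro l cur hcur
      simp only [List.foldl_cons, hcur]
      exact ih (l ++ [cur ++ " " ++ c]) (cur ++ " " ++ c) (getLast!_concat' l _)

lemma loop_eq : ∀ (cs result : List String), pcLoop result cs = result ++ permute_chunks cs := by
  intro cs
  induction cs with
  | nil => intro result; simp [pcLoop, permute_chunks]
  | cons x cs ih =>
      intro result
      cases cs with
      | nil => simp [pcLoop, permute_chunks]
      | cons y rest =>
          rw [show pcLoop result (x :: y :: rest)
                = pcLoop (result ++ pcPrefixes x (y :: rest)) (y :: rest) from rfl,
             ih, permute_chunks, pcPrefixes,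
             ← pref_eq (y :: rest) [x] x (by rfl)]
          simp

-- ===== VERDICT (by name: the statement is the Claim_ definition above) =====
theorem permute_chunks_spec : Claim_equal_permute_chunks := by
  intro chunks _ _
  unfold Spec_permute_chunks permute_chunks_alt
  rw [loop_eq]
  simp
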